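-- pv_equiv track=rewrite | github.com/Rejean-McCormick/abstract-wiki-architect | app/adapters/engines/engines/austronesian.py | _apply_suffix_rules
-- ===== SOURCE A (Python) =====
-- def _apply_suffix_rules(word, rules):
--     """
--     Apply the first matching suffix replacement rule.
--
--     Expected shape:
--         [{"ends_with": "o", "replace_with": "a"}, ...]
--     """
--     if not isinstance(word, str):
--         return ""
--     if not isinstance(rules, list):
--         return word
--
--     sorted_rules = sorted(
--         rules,
--         key=lambda rule: len(rule.get("ends_with", "")),
--         reverse=True,
--     )
--
--     for rule in sorted_rules:
--         ending = rule.get("ends_with", "")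
--         replacement = rule.get("replace_with", "")
--         if ending and word.endswith(ending):
--             return word[: -len(ending)] + replacement
--
--     return word
-- ===== SOURCE B (Python) =====
-- def _apply_suffix_rules(word, rules):
--     """Single pass: track the longest matching ending (strict > keeps the
--     earliest rule on ties), instead of sorting the rules first."""
--     if not isinstance(word, str):
--         return ""
--     if not isinstance(rules, list):
--         return word
--
--     best = None
--     best_len = 0
--     for rule in rules:
--         ending = rule.get("ends_with", "")
--         if ending and word.endswith(ending) and len(ending) > best_len:
--             best = rule
--             best_len = len(ending)
--
--     if best is None:
--         return word
--     return word[:-best_len] + best.get("replace_with", "")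
-- ===== Notes on version B (the rewrite author's own statement) =====
-- stated objective: simpler
-- what changed: Replaces sort-by-suffix-length-then-scan with a single pass over the rules that tracks the longest matching ending (strict > reproduces the stable sort's original-order tie-break).
import Mathlib
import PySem

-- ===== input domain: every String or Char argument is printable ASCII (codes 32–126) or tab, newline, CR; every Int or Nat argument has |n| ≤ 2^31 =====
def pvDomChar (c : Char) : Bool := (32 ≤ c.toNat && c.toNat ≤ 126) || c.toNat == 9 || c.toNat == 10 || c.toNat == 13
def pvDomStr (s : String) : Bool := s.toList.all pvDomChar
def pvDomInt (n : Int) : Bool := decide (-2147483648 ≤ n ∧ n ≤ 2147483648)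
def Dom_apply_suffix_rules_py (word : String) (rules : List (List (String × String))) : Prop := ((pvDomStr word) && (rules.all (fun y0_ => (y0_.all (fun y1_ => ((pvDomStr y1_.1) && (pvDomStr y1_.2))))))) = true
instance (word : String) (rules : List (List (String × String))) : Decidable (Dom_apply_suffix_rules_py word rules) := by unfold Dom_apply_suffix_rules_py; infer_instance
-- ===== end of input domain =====

-- B replaces A's sort-then-scan by a single pass tracking the longest matching
-- ending (objective: simpler). The isinstance guards vanish: the types fix them.

-- ===== PORT A =====
-- the scan over the sorted rules, returning on the first match
def pvLoopA (word : String) : List (List (String × String)) → String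
  | [] => word
  | rule :: rest =>
    let ending := PySem.Dict.getD ⟨rule⟩ "ends_with" ""
    let replacement := PySem.Dict.getD ⟨rule⟩ "replace_with" ""
    if (ending != "") && PySem.Str.endswith word ending then
      PySem.Str.slice word none (some (-(PySem.Str.len ending))) ++ replacement
    else pvLoopA word rest

def apply_suffix_rules_py (word : String) (rules : List (List (String × String))) : String :=
  let sorted_rules := PySem.List.sorted rules
    (fun rule => PySem.Str.len (PySem.Dict.getD ⟨rule⟩ "ends_with" "")) true
  pvLoopA word sorted_rules

-- ===== PORT B =====
def apply_suffix_rules_py_alt (word : String) (rules : List (List (String × String))) : String :=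
  let st := rules.foldl
    (fun (st : Option (List (String × String)) × Int) rule =>
      let ending := PySem.Dict.getD ⟨rule⟩ "ends_with" ""
      if (ending != "") && PySem.Str.endswith word ending && decide (st.2 < PySem.Str.len ending)
      then (some rule, PySem.Str.len ending)
      else st)
    (none, 0)
  match st.1 with
  | none => word
  | some best => PySem.Str.slice word none (some (-st.2)) ++ PySem.Dict.getD ⟨best⟩ "replace_with" ""

-- ===== PRECONDITION & SPEC =====
def Spec_apply_suffix_rules_py (word : String) (rules : List (List (String × String))) (out : String) : Prop := out = apply_suffix_rules_py_alt word rules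
instance (word : String) (rules : List (List (String × String))) (out : String) : Decidable (Spec_apply_suffix_rules_py word rules out) := by unfold Spec_apply_suffix_rules_py; infer_instance

-- ===== CLAIM (what is proved, stated in full; the proofs are below) =====
def Claim_equal_apply_suffix_rules_py : Prop := ∀ (word : String) (rules : List (List (String × String))), Dom_apply_suffix_rules_py word rules → Spec_apply_suffix_rules_py word rules (apply_suffix_rules_py word rules)

-- ===== LEMMAS AND PROOFS =====

-- shared vocabulary for the proofs (not used by the ports)
def pvKey (rule : List (String × String)) : Int :=
  PySem.Str.len (PySem.Dict.getD ⟨rule⟩ "ends_with" "")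

def pvP (word : String) (rule : List (String × String)) : Bool :=
  (PySem.Dict.getD ⟨rule⟩ "ends_with" "" != "") &&
    PySem.Str.endswith word (PySem.Dict.getD ⟨rule⟩ "ends_with" "")

def pvOut (word : String) (rule : List (String × String)) : String :=
  PySem.Str.slice word none (some (-(pvKey rule))) ++ PySem.Dict.getD ⟨rule⟩ "replace_with" ""

-- B's loop body, named
def pvStep (word : String) (st : Option (List (String × String)) × Int)
    (rule : List (String × String)) : Option (List (String × String)) × Int :=
  if pvP word rule && decide (st.2 < pvKey rule) then (some rule, pvKey rule) else st

theorem pvKey_pos (word : String) (r : List (String × String)) (h : pvP word r = true) :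
    0 < pvKey r := by
  unfold pvP at h
  unfold pvKey
  simp only [Bool.and_eq_true] at h
  obtain ⟨h1, _⟩ := h
  rw [bne_iff_ne] at h1
  rw [PySem.Str.len_eq]
  have hne : (PySem.Dict.getD ⟨r⟩ "ends_with" "").toList ≠ [] := by
    intro hnil
    exact h1 (String.toList_eq_nil_iff.mp hnil)
  have := List.length_pos_of_ne_nil hne
  exact_mod_cast this

theorem pvLoopA_eq_find (word : String) (l : List (List (String × String))) :
    pvLoopA word l = (match l.find? (pvP word) with
      | none => word
      | some r => pvOut word r) := by
  induction l with
  | nil => rfl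
  | cons r rest ih =>
    rw [List.find?_cons]
    have hstep : pvLoopA word (r :: rest)
        = if pvP word r then pvOut word r else pvLoopA word rest := rfl
    rw [hstep]
    cases hP : pvP word r with
    | false => simp only [Bool.false_eq_true, if_false]; rw [ih]
    | true => simp

-- find? over Python's stable insertion step, on a key-descending list
theorem pvFind_insertBy {α : Type} (key : α → Int) (P : α → Bool) (x : α)
    (l : List α) (hl : l.Pairwise (fun a b => key b ≤ key a)) :
    (PySem.List.insertBy (fun a b => decide (key b < key a)) x l).find? P =
      (match l.find? P with
        | none => if P x then some x else none
        | some c => if P x && decide (key c < key x) then some x else some c) := by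
  induction l with
  | nil => by_cases hx : P x = true <;> simp [PySem.List.insertBy, List.find?, hx]
  | cons y ys ih =>
    have hy : ∀ b ∈ ys, key b ≤ key y := (List.pairwise_cons.mp hl).1
    have hys : ys.Pairwise (fun a b => key b ≤ key a) := (List.pairwise_cons.mp hl).2
    by_cases hlt : key y < key x
    · -- x is inserted in front
      have hins : PySem.List.insertBy (fun a b => decide (key b < key a)) x (y :: ys)
          = x :: y :: ys := by simp [PySem.List.insertBy, hlt]
      rw [hins]
      cases hx : P x with
      | true =>
        cases hc : (y :: ys).find? P with
        | none => rw [List.find?_cons_of_pos hx]; simp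
        | some c =>
          have hmem := List.mem_of_find?_eq_some hc
          have hcle : key c ≤ key y := by
            rcases List.mem_cons.mp hmem with hcy | hcy
            · exact le_of_eq (congrArg key hcy)
            · exact hy c hcy
          have hck : key c < key x := lt_of_le_of_lt hcle hlt
          rw [List.find?_cons_of_pos hx]; simp [hck]
      | false =>
        cases hc : (y :: ys).find? P with
        | none => rw [List.find?_cons_of_neg (by simp [hx]), hc]; simp
        | some c => rw [List.find?_cons_of_neg (by simp [hx]), hc]; simp
    · -- x goes after y
      have hstep : PySem.List.insertBy (fun a b => decide (key b < key a)) x (y :: ys)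
          = y :: PySem.List.insertBy (fun a b => decide (key b < key a)) x ys := by
        simp [PySem.List.insertBy, hlt]
      rw [hstep]
      cases hPy : P y with
      | true =>
        have hxy : ¬ (key y < key x) := hlt
        simp [hPy, hxy]
      | false =>
        simp [hPy, ih hys]

-- the state of B's fold, expressed from the chosen rule
def pvPair : Option (List (String × String)) → Option (List (String × String)) × Int
  | none => (none, 0)
  | some c => (some c, pvKey c)

theorem pvFold_eq (word : String) (l : List (List (String × String))) :
    l.foldl (pvStep word) (none, 0)
      = pvPair ((PySem.List.sorted l pvKey true).find? (pvP word)) := by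
  induction l using List.reverseRecOn with
  | nil => rfl
  | append_singleton xs x ih =>
    rw [List.foldl_append, List.foldl_cons, List.foldl_nil, ih]
    have hsorted : PySem.List.sorted (xs ++ [x]) pvKey true
        = PySem.List.insertBy (fun a b => decide (pvKey b < pvKey a)) x
            (PySem.List.sorted xs pvKey true) := by
      rw [PySem.List.sorted_rev_eq_foldl_insertBy, PySem.List.sorted_rev_eq_foldl_insertBy,
        List.foldl_append, List.foldl_cons, List.foldl_nil]
    rw [hsorted, pvFind_insertBy pvKey (pvP word) x _ (PySem.List.sorted_pairwise_rev xs pvKey)]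
    cases hc : (PySem.List.sorted xs pvKey true).find? (pvP word) with
    | none =>
      cases hx : pvP word x with
      | true =>
        have hk : (0 : Int) < pvKey x := pvKey_pos word x hx
        simp [pvPair, pvStep, hx, hk]
      | false => simp [pvPair, pvStep, hx]
    | some c =>
      cases hx : pvP word x with
      | true =>
        by_cases hck : pvKey c < pvKey x
        · simp [pvPair, pvStep, hx, hck]
        · simp [pvPair, pvStep, hx, hck]
      | false => simp [pvPair, pvStep, hx]

-- ===== VERDICT (by name: the statement is the Claim_ definition above) =====
theorem apply_suffix_rules_py_spec : Claim_equal_apply_suffix_rules_py := by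
  intro word rules _
  unfold Spec_apply_suffix_rules_py apply_suffix_rules_py apply_suffix_rules_py_alt
  have hfun : (fun (st : Option (List (String × String)) × Int)
      (rule : List (String × String)) =>
      if (PySem.Dict.getD ⟨rule⟩ "ends_with" "" != "") &&
          PySem.Str.endswith word (PySem.Dict.getD ⟨rule⟩ "ends_with" "") &&
          decide (st.2 < PySem.Str.len (PySem.Dict.getD ⟨rule⟩ "ends_with" ""))
      then (some rule, PySem.Str.len (PySem.Dict.getD ⟨rule⟩ "ends_with" ""))
      else st) = pvStep word := rfl
  have hkey : (fun rule : List (String × String) =>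
      PySem.Str.len (PySem.Dict.getD ⟨rule⟩ "ends_with" "")) = pvKey := rfl
  rw [hfun, hkey, pvFold_eq word rules, pvLoopA_eq_find]
  cases hc : (PySem.List.sorted rules pvKey true).find? (pvP word) with
  | none => simp [pvPair]
  | some c => simp [pvPair, pvOut, pvKey]
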